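-- pv_equiv track=rewrite | github.com/AntuanW/ASD-2022 | ćwiczenia/ćw 7 28-05-22/zad4.py | build_tower
-- ===== SOURCE A (Python) =====
-- def build_tower(T):
--     summary = []
--     for i in range(len(T)):
--         T[i].sort()
--         summary.append(sum(T[i]))
--     count = tower_height = 0
--     while tower_height < max(summary):
--         index = summary.index(max(summary))
--         height = T[index].pop()
--         tower_height += height
--         summary[index] -= height
--         count += 1
--     return count
-- ===== SOURCE B (Python) =====
-- def _insert(lst, item):
--     # return a new list = lst with item placed before the first element >= it
--     k = 0
--     while k < len(lst) and lst[k] < item: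
--         k += 1
--     return lst[:k] + [item] + lst[k:]
--
--
-- def build_tower(T):
--     rests = [sorted(t, reverse=True) for t in T]
--     order = []
--     for i, r in enumerate(rests):
--         order = _insert(order, (-sum(r), i))
--     tower = 0
--     count = 0
--     while order and tower < -order[0][0]:
--         negsum, i = order[0]
--         r = rests[i]
--         h = r[0]
--         rests[i] = r[1:]
--         tower += h
--         count += 1
--         order = _insert(order[1:], (negsum + h, i))
--     return count
-- ===== Notes on version B (the rewrite author's own statement) =====
-- stated objective: alternative
-- what changed: B replaces A's per-iteration max(summary)+summary.index scans and in-place pop of T with a priority structure: a list of (-sum, index) pairs kept sorted ascending, whose head is always the next pick and which is updated by removing the head and re-inserting the decreased key; inner lists are pre-sorted descending and consumed from the front without mutating T.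
-- outside the precondition, e.g. on build_tower([]): A raises ValueError, B returns 0
import Mathlib
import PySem

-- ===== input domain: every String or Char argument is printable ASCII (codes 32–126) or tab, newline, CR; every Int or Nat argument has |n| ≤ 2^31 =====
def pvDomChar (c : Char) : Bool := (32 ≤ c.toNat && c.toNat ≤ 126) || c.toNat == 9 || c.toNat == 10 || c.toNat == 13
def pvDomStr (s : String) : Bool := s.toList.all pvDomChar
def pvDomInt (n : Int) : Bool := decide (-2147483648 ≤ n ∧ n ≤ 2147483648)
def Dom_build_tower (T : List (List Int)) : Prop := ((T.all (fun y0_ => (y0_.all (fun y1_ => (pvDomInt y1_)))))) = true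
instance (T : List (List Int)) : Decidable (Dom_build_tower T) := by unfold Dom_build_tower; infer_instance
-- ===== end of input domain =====

-- B keeps a sorted list of (-sum, index) pairs as a priority structure instead of A's per-iteration
-- max+index scans; equivalence is about the RETURN value only (A sorts and pops the inner lists of T
-- in place, B does not mutate T).

-- ===== PORT A =====
-- 'for i in range(len(T)): T[i].sort(); summary.append(sum(T[i]))'
def pvSortSum : List (List Int) → List (List Int) × List Int
  | [] => ([], [])
  | t :: ts =>
    let s := PySem.List.sorted t (fun x => x)
    let r := pvSortSum ts
    (s :: r.1, s.sum :: r.2)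

-- the while loop; fuel = one more than the total number of elements (each iteration pops one);
-- the 'none' branches are where Python raises (max of empty summary / pop from empty list)
def pvLoopA : Nat → List (List Int) → List Int → Int → Int → Int
  | 0, _, _, _, count => count
  | fuel + 1, Ts, summary, tower, count =>
    match PySem.List.max? summary (fun x => x) with
    | none => count
    | some m =>
      if tower < m then
        match PySem.List.index? summary m with
        | none => count
        | some k =>
          match PySem.List.pop? (Ts.getD k []) (-1) with
          | none => count
          | some (h, rest) =>
            pvLoopA fuel (Ts.set k rest) (summary.set k (summary.getD k 0 - h)) (tower + h) (count + 1)
      else count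

def build_tower (T : List (List Int)) : Int :=
  let p := pvSortSum T
  pvLoopA ((T.map List.length).sum + 1) p.1 p.2 0 0

-- ===== PORT B =====
-- Python tuple comparison (a, b) < (c, d) on ints
def pvLexLt (a b : Int × Int) : Bool := a.1 < b.1 || (a.1 == b.1 && a.2 < b.2)

-- '_insert': place item before the first element that is not < item
def pvInsert (lst : List (Int × Int)) (item : Int × Int) : List (Int × Int) :=
  match lst with
  | [] => [item]
  | p :: rest => if pvLexLt p item then p :: pvInsert rest item else item :: p :: rest

-- the while loop of Source B; same fuel bound as A's loop
def pvLoopB : Nat → List (Int × Int) → List (List Int) → Int → Int → Int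
  | 0, _, _, _, count => count
  | fuel + 1, order, rests, tower, count =>
    match order with
    | [] => count
    | (ns, i) :: rest =>
      if tower < -ns then
        match PySem.List.pyGet? rests i with
        | none => count
        | some r =>
          match r with
          | [] => count
          | h :: rtail =>
            pvLoopB fuel (pvInsert rest (ns + h, i)) (PySem.List.pySetD rests i rtail) (tower + h) (count + 1)
      else count

def build_tower_alt (T : List (List Int)) : Int :=
  let rests := T.map (fun t => PySem.List.sorted t (fun x => x) true)
  let order := (PySem.List.enumerate rests).foldl (fun acc p => pvInsert acc (-(p.2.sum), p.1)) []
  pvLoopB ((T.map List.length).sum + 1) order rests 0 0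

-- ===== PRECONDITION & SPEC =====
-- Pre_ excludes only T = [], where Python A raises ValueError (max of the empty summary);
-- it admits every input on which A returns
def Pre_build_tower (T : List (List Int)) : Prop := T ≠ []
instance (T : List (List Int)) : Decidable (Pre_build_tower T) := by unfold Pre_build_tower; infer_instance
def pvWitness_build_tower : List (List Int) := [[1]]

def Spec_build_tower (T : List (List Int)) (out : Int) : Prop := out = build_tower_alt T
instance (T : List (List Int)) (out : Int) : Decidable (Spec_build_tower T out) := by unfold Spec_build_tower; infer_instance

-- ===== CLAIM (what is proved, stated in full; the proofs are below) =====
def Claim_equal_build_tower : Prop := ∀ (T : List (List Int)), Dom_build_tower T → Pre_build_tower T → Spec_build_tower T (build_tower T)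

-- ===== LEMMAS AND PROOFS =====

-- the strict lexicographic order as a Prop
def pvLex (a b : Int × Int) : Prop := pvLexLt a b = true

-- the pairs (-s[k], j+k) in position order: what the sorted 'order' list is a permutation of
def pvPairs : List Int → Int → List (Int × Int)
  | [], _ => []
  | s :: rest, j => (-s, j) :: pvPairs rest (j + 1)

theorem pvLex_trans {a b c : Int × Int} (h1 : pvLex a b) (h2 : pvLex b c) : pvLex a c := by
  simp only [pvLex, pvLexLt, Bool.or_eq_true, decide_eq_true_eq, Bool.and_eq_true,
    beq_iff_eq] at h1 h2 ⊢
  omega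


theorem pvLex_total {a b : Int × Int} (h : a ≠ b) : pvLex a b ∨ pvLex b a := by
  have hne : a.1 ≠ b.1 ∨ a.2 ≠ b.2 := by
    by_contra hc
    push Not at hc
    exact h (Prod.ext hc.1 hc.2)
  simp only [pvLex, pvLexLt, Bool.or_eq_true, decide_eq_true_eq, Bool.and_eq_true, beq_iff_eq]
  omega


theorem pvLex_irrefl (a : Int × Int) : ¬ pvLex a a := by
  simp only [pvLex, pvLexLt, Bool.or_eq_true, decide_eq_true_eq, Bool.and_eq_true, beq_iff_eq]
  omega


theorem pvInsert_perm (lst : List (Int × Int)) (item : Int × Int) :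
    (pvInsert lst item).Perm (item :: lst) := by
  induction lst with
  | nil => rfl
  | cons p rest ih =>
    by_cases h : pvLexLt p item
    · simp only [pvInsert, h, if_true]
      exact (ih.cons p).trans (List.Perm.swap item p rest)
    · simp only [pvInsert, h, Bool.false_eq_true, if_false]
      exact List.Perm.refl _


theorem pvInsert_pairwise (lst : List (Int × Int)) (item : Int × Int)
    (hpw : lst.Pairwise pvLex) (hne : ∀ p ∈ lst, p ≠ item) :
    (pvInsert lst item).Pairwise pvLex := by
  induction lst with
  | nil => simp [pvInsert]
  | cons p rest ih =>
    rcases List.pairwise_cons.mp hpw with ⟨hp, hrest⟩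
    by_cases h : pvLexLt p item
    · simp only [pvInsert, h, if_true]
      refine List.pairwise_cons.mpr ⟨?_, ih hrest (fun q hq => hne q (List.mem_cons_of_mem p hq))⟩
      intro q hq
      rcases List.mem_cons.mp ((pvInsert_perm rest item).mem_iff.mp hq) with rfl | hq'
      · exact h
      · exact hp q hq'
    · simp only [pvInsert, h, Bool.false_eq_true, if_false]
      have hip : pvLex item p := by
        have hpi : p ≠ item := hne p List.mem_cons_self
        rcases pvLex_total hpi with h1 | h1
        · exact absurd (show pvLexLt p item = true from h1) h
        · exact h1
      refine List.pairwise_cons.mpr ⟨?_, hpw⟩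
      intro q hq
      rcases List.mem_cons.mp hq with rfl | hq'
      · exact hip
      · exact pvLex_trans hip (hp q hq')


theorem pvPairs_length (s : List Int) (j : Int) : (pvPairs s j).length = s.length := by
  induction s generalizing j with
  | nil => rfl
  | cons x rest ih => simp [pvPairs, ih]


theorem pvPairs_getElem (s : List Int) (j : Int) (k : Nat) (hk : k < s.length) :
    (pvPairs s j)[k]'(by rw [pvPairs_length]; exact hk) = (-s[k], j + k) := by
  induction s generalizing j k with
  | nil => simp at hk
  | cons x rest ih =>
    cases k with
    | zero => simp [pvPairs]
    | succ k' =>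
      have hk' : k' < rest.length := by simpa using hk
      have := ih (j + 1) k' hk'
      simp only [pvPairs, List.getElem_cons_succ, this, Prod.mk.injEq, true_and]
      push_cast
      ring


theorem pvPairs_mem {s : List Int} {j : Int} {p : Int × Int} (h : p ∈ pvPairs s j) :
    ∃ (k : Nat) (hk : k < s.length), p = (-s[k], j + k) := by
  rcases List.mem_iff_getElem.mp h with ⟨k, hk, hget⟩
  have hk' : k < s.length := by rwa [pvPairs_length] at hk
  exact ⟨k, hk', by rw [← hget, pvPairs_getElem s j k hk']⟩


theorem pvPairs_set (s : List Int) (j : Int) (k : Nat) (v : Int) (hk : k < s.length) :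
    pvPairs (s.set k v) j = (pvPairs s j).set k (-v, j + k) := by
  induction s generalizing j k with
  | nil => simp at hk
  | cons x rest ih =>
    cases k with
    | zero => simp [pvPairs]
    | succ k' =>
      have hk' : k' < rest.length := by simpa using hk
      have e : (j : Int) + ((k' : Int) + 1) = j + 1 + (k' : Int) := by ring
      simp only [List.set_cons_succ, pvPairs, Nat.cast_add, Nat.cast_one, e, ih (j + 1) k' hk']


theorem pvPairs_eq_nil_iff (s : List Int) (j : Int) : pvPairs s j = [] ↔ s = [] := by
  cases s <;> simp [pvPairs]


-- head of the sorted 'order' list = (-(max of summary), first index attaining it)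
theorem pvHead_spec (s : List Int) (rest : List (Int × Int)) (ns i : Int)
    (hperm : ((ns, i) :: rest).Perm (pvPairs s 0))
    (hpw : ((ns, i) :: rest).Pairwise pvLex) :
    ∃ (k : Nat) (hk : k < s.length), i = (k : Int) ∧ s[k] = -ns ∧
      PySem.List.max? s (fun x => x) = some (-ns) ∧
      PySem.List.index? s (-ns) = some k ∧
      (∀ p ∈ rest, p.2 ≠ (k : Int)) := by
  have hmemp : (ns, i) ∈ pvPairs s 0 := hperm.mem_iff.mp List.mem_cons_self
  rcases pvPairs_mem hmemp with ⟨k, hk, hpk⟩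
  have hns : ns = -s[k] := by simpa using congrArg Prod.fst hpk
  have hik : i = (k : Int) := by simpa using congrArg Prod.snd hpk
  have hmin : ∀ q ∈ pvPairs s 0, q = (ns, i) ∨ pvLex (ns, i) q := by
    intro q hq
    rcases List.mem_cons.mp (hperm.mem_iff.mpr hq) with rfl | hq'
    · exact Or.inl rfl
    · exact Or.inr ((List.pairwise_cons.mp hpw).1 q hq')
  have hb : ∀ (j : Nat) (hj : j < s.length),
      s[j] ≤ -ns ∧ (j ≠ k → s[j] < -ns ∨ k < j) := by
    intro j hj
    have hqmem : (-s[j], (j : Int)) ∈ pvPairs s 0 := by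
      refine List.mem_iff_getElem.mpr ⟨j, by rw [pvPairs_length]; exact hj, ?_⟩
      rw [pvPairs_getElem s 0 j hj]
      simp
    rcases hmin _ hqmem with heq | hlt
    · have h1 : -s[j] = ns := by simpa using congrArg Prod.fst heq
      have h2 : (j : Int) = i := by simpa using congrArg Prod.snd heq
      have hjk : j = k := by rw [hik] at h2; exact_mod_cast h2
      constructor
      · omega
      · intro hne; exact absurd hjk hne
    · simp only [pvLex, pvLexLt, Bool.or_eq_true, decide_eq_true_eq, Bool.and_eq_true,
        beq_iff_eq] at hlt
      rw [hik] at hlt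
      constructor
      · omega
      · intro _
        rcases hlt with h1 | ⟨h1, h2⟩
        · left; omega
        · right; exact_mod_cast h2
  have hkmem : -ns ∈ s := by
    have := List.getElem_mem hk
    rw [hns]; simp
  have hmax : PySem.List.max? s (fun x => x) = some (-ns) := by
    cases hmx : PySem.List.max? s (fun x => x) with
    | none =>
      rw [PySem.List.max?_eq_none_iff] at hmx
      subst hmx; simp at hk
    | some m =>
      have hm1 : m ∈ s := PySem.List.max?_mem hmx
      have hm2 : -ns ≤ m := PySem.List.max?_isMax hmx _ hkmem
      rcases List.mem_iff_getElem.mp hm1 with ⟨j, hj, hjm⟩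
      have := (hb j hj).1
      rw [hjm] at this
      have : m = -ns := le_antisymm this hm2
      rw [this]
  have hidx : PySem.List.index? s (-ns) = some k := by
    rw [PySem.List.index?_eq_some_iff]
    refine ⟨s.take k, s.drop (k + 1), ?_, ?_, ?_⟩
    · have h1 : s.take k ++ s.drop k = s := List.take_append_drop k s
      rw [← List.getElem_cons_drop hk] at h1
      rw [show -ns = s[k] by omega]
      exact h1.symm
    · simp [List.length_take, Nat.min_eq_left hk.le]
    · intro hmem'
      rcases List.mem_take_iff_getElem.mp hmem' with ⟨j, hjm, hjs⟩
      have hjk : j < k := lt_of_lt_of_le hjm (min_le_left _ _)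
      have hjlen : j < s.length := lt_trans hjk hk
      have := (hb j hjlen).2 (Nat.ne_of_lt hjk)
      rw [hjs] at this
      rcases this with h1 | h1
      · omega
      · omega
  refine ⟨k, hk, hik, by omega, hmax, hidx, ?_⟩
  intro p hp hp2
  rcases pvPairs_mem (hperm.mem_iff.mp (List.mem_cons_of_mem _ hp)) with ⟨j, hj, hpj⟩
  have hps : p.2 = (j : Int) := by simpa using congrArg Prod.snd hpj
  have hjk : j = k := by rw [hps] at hp2; exact_mod_cast hp2
  subst hjk
  have hpeq : p = (ns, i) := by
    rw [hpj, ← hns, hik]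
    simp
  have := (List.pairwise_cons.mp hpw).1 p hp
  rw [hpeq] at this
  exact pvLex_irrefl _ this


-- sorted(t, reverse=True) = reverse of sorted(t) for integer lists
theorem pvSortedRev_eq (t : List Int) :
    PySem.List.sorted t (fun x => x) true = (PySem.List.sorted t (fun x => x)).reverse := by
  refine List.Perm.eq_of_pairwise (le := fun a b : Int => b ≤ a)
      (fun a b _ _ h1 h2 => le_antisymm h2 h1) ?_ ?_ ?_
  · exact PySem.List.sorted_pairwise_rev t (fun x => x)
  · exact (List.pairwise_reverse).mpr (PySem.List.sorted_pairwise t (fun x => x))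
  · exact (PySem.List.sorted_perm t (fun x => x) true).trans
      ((PySem.List.sorted_perm t (fun x => x) false).symm.trans (List.reverse_perm _).symm)


theorem pvSortSum_eq (T : List (List Int)) :
    pvSortSum T = (T.map (fun t => PySem.List.sorted t (fun x => x)),
                   T.map (fun t => (PySem.List.sorted t (fun x => x)).sum)) := by
  induction T with
  | nil => rfl
  | cons t ts ih => simp [pvSortSum, ih]


-- the order-building fold of Source B establishes the invariant
theorem pvFold_spec (rs : List (List Int)) (j : Int) (acc : List (Int × Int))
    (hpw : acc.Pairwise pvLex) (hlt : ∀ p ∈ acc, p.2 < j) :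
    ((PySem.List.enumerate rs j).foldl (fun a p => pvInsert a (-(p.2.sum), p.1)) acc).Perm
        (acc ++ pvPairs (rs.map List.sum) j) ∧
    ((PySem.List.enumerate rs j).foldl (fun a p => pvInsert a (-(p.2.sum), p.1)) acc).Pairwise pvLex ∧
    (∀ p ∈ (PySem.List.enumerate rs j).foldl (fun a p => pvInsert a (-(p.2.sum), p.1)) acc,
        p.2 < j + rs.length) := by
  induction rs generalizing j acc with
  | nil =>
    simp only [PySem.List.enumerate_nil, List.foldl_nil, List.map_nil]
    refine ⟨by simp [pvPairs], hpw, ?_⟩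
    intro p hp
    have := hlt p hp
    simp only [List.length_nil]
    omega
  | cons r rs ih =>
    simp only [PySem.List.enumerate_cons, List.foldl_cons]
    have hne : ∀ p ∈ acc, p ≠ (-r.sum, j) := by
      intro p hp he
      have := hlt p hp
      rw [he] at this
      simp at this
    have hpw' : (pvInsert acc (-r.sum, j)).Pairwise pvLex := pvInsert_pairwise acc _ hpw hne
    have hlt' : ∀ p ∈ pvInsert acc (-r.sum, j), p.2 < j + 1 := by
      intro p hp
      rcases List.mem_cons.mp ((pvInsert_perm acc (-r.sum, j)).mem_iff.mp hp) with rfl | hp'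
      · simp
      · have := hlt p hp'; omega
    rcases ih (j + 1) (pvInsert acc (-r.sum, j)) hpw' hlt' with ⟨hP, hW, hB⟩
    refine ⟨?_, hW, ?_⟩
    · have h1 : (pvInsert acc (-r.sum, j) ++ pvPairs (rs.map List.sum) (j + 1)).Perm
          (((-r.sum, j) :: acc) ++ pvPairs (rs.map List.sum) (j + 1)) :=
        (pvInsert_perm acc (-r.sum, j)).append_right _
      have h2 : (((-r.sum, j) :: acc) ++ pvPairs (rs.map List.sum) (j + 1)).Perm
          (acc ++ (-r.sum, j) :: pvPairs (rs.map List.sum) (j + 1)) := List.perm_middle.symm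
      have h3 := (hP.trans h1).trans h2
      simpa [pvPairs] using h3
    · intro p hp
      have := hB p hp
      simp only [List.length_cons]
      push_cast at this ⊢
      omega


-- the two loops agree step by step
theorem pvLoop_eq (fuel : Nat) : ∀ (Ts : List (List Int)) (s : List Int)
    (order : List (Int × Int)) (tower count : Int),
    s.length = Ts.length →
    order.Perm (pvPairs s 0) →
    order.Pairwise pvLex →
    pvLoopA fuel Ts s tower count = pvLoopB fuel order (Ts.map List.reverse) tower count := by
  induction fuel with
  | zero => intro Ts s order tower count _ _ _; rfl
  | succ fuel ih =>
    intro Ts s order tower count hlen hperm hpw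
    cases horder : order with
    | nil =>
      subst horder
      have hpnil : pvPairs s 0 = [] := List.perm_nil.mp hperm.symm
      have hs : s = [] := (pvPairs_eq_nil_iff s 0).mp hpnil
      subst hs
      simp [pvLoopA, pvLoopB, PySem.List.max?]
    | cons hd rest =>
      obtain ⟨ns, i⟩ := hd
      subst horder
      rcases pvHead_spec s rest ns i hperm hpw with ⟨k, hk, hik, hsk, hmax, hidx, hrest⟩
      have hkT : k < Ts.length := hlen ▸ hk
      show (match PySem.List.max? s (fun x => x) with
        | none => count
        | some m =>
          if tower < m then
            match PySem.List.index? s m with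
            | none => count
            | some k =>
              match PySem.List.pop? (Ts.getD k []) (-1) with
              | none => count
              | some (h, rest) =>
                pvLoopA fuel (Ts.set k rest) (s.set k (s.getD k 0 - h)) (tower + h) (count + 1)
          else count) = _
      rw [hmax]
      by_cases hc : tower < -ns
      · simp only [if_pos hc]
        rw [hidx]
        have hTk : Ts.getD k [] = Ts[k] := List.getD_eq_getElem Ts [] hkT
        have hrk : PySem.List.pyGet? (Ts.map List.reverse) (i : Int) = some Ts[k].reverse := by
          rw [hik, PySem.List.pyGet?_natCast]
          rw [List.getElem?_eq_getElem (by simpa using hkT)]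
          rw [List.getElem_map]
        show _ = (match (ns, i) :: rest with
          | [] => count
          | (ns, i) :: rest =>
            if tower < -ns then
              match PySem.List.pyGet? (Ts.map List.reverse) i with
              | none => count
              | some r =>
                match r with
                | [] => count
                | h :: rtail =>
                  pvLoopB fuel (pvInsert rest (ns + h, i)) (PySem.List.pySetD (Ts.map List.reverse) i rtail) (tower + h) (count + 1)
            else count)
        simp only [if_pos hc, hrk, hTk]
        cases ht : Ts[k] with
        | nil => simp [PySem.List.pop?]
        | cons x xs =>
          have htne : Ts[k] ≠ [] := by rw [ht]; simp
          have hsplit : Ts[k] = Ts[k].dropLast ++ [Ts[k].getLast htne] :=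
            (List.dropLast_concat_getLast htne).symm
          rw [← ht]
          rw [hsplit, PySem.List.pop?_last, List.reverse_append]
          simp only [List.reverse_cons, List.reverse_nil, List.nil_append, List.singleton_append]
          set g := Ts[k].getLast htne
          set dl := Ts[k].dropLast
          have hset : PySem.List.pySetD (Ts.map List.reverse) i dl.reverse
              = (Ts.set k dl).map List.reverse := by
            rw [hik, PySem.List.pySetD_natCast, List.map_set]
          rw [hset]
          have hgd : s.getD k 0 = -ns := by rw [List.getD_eq_getElem s 0 hk, hsk]
          rw [hgd]
          -- establish the invariant for the next state
          have hpairs_k : (pvPairs s 0)[k]'(by rw [pvPairs_length]; exact hk) = (ns, i) := by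
            rw [pvPairs_getElem s 0 k hk, hsk, hik]
            simp
          have hEsplit : pvPairs s 0 =
              (pvPairs s 0).take k ++ (ns, i) :: (pvPairs s 0).drop (k + 1) := by
            have h1 : (pvPairs s 0).take k ++ (pvPairs s 0).drop k = pvPairs s 0 :=
              List.take_append_drop k _
            rw [← List.getElem_cons_drop (by rw [pvPairs_length]; exact hk), hpairs_k] at h1
            exact h1.symm
          have hrestE : rest.Perm ((pvPairs s 0).take k ++ (pvPairs s 0).drop (k + 1)) := by
            have h1 : ((ns, i) :: rest).Perm
                ((ns, i) :: ((pvPairs s 0).take k ++ (pvPairs s 0).drop (k + 1))) := by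
              refine hperm.trans ?_
              conv_lhs => rw [hEsplit]
              exact List.perm_middle
            exact h1.cons_inv
          have hpairs_set : pvPairs (s.set k (-ns - g)) 0
              = (pvPairs s 0).set k (ns + g, (k : Int)) := by
            rw [pvPairs_set s 0 k (-ns - g) hk]
            congr 1
            simp
            ring
          have hperm' : (pvInsert rest (ns + g, i)).Perm (pvPairs (s.set k (-ns - g)) 0) := by
            rw [hpairs_set, hik]
            have h1 : (pvInsert rest (ns + g, (k : Int))).Perm ((ns + g, (k : Int)) :: rest) :=
              pvInsert_perm rest _
            have h2 : ((ns + g, (k : Int)) :: rest).Perm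
                ((ns + g, (k : Int)) :: ((pvPairs s 0).take k ++ (pvPairs s 0).drop (k + 1))) :=
              hrestE.cons _
            have h3 : (pvPairs s 0).set k (ns + g, (k : Int))
                = (pvPairs s 0).take k ++ (ns + g, (k : Int)) :: (pvPairs s 0).drop (k + 1) := by
              rw [List.set_eq_take_append_cons_drop]
              rw [if_pos (by rw [pvPairs_length]; exact hk)]
            rw [h3]
            exact (h1.trans h2).trans List.perm_middle.symm
          have hpw' : (pvInsert rest (ns + g, i)).Pairwise pvLex := by
            refine pvInsert_pairwise rest _ (List.pairwise_cons.mp hpw).2 ?_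
            intro p hp he
            have := hrest p hp
            rw [he, hik] at this
            simp at this
          have := ih (Ts.set k dl) (s.set k (-ns - g))
            (pvInsert rest (ns + g, i)) (tower + g) (count + 1)
            (by rw [List.length_set, List.length_set]; exact hlen) hperm' hpw'
          rw [hik] at this ⊢
          exact this
      · simp only [if_neg hc]
        show _ = (if tower < -ns then _ else count)
        rw [if_neg hc]


-- ===== VERDICT (by name: the statement is the Claim_ definition above) =====
theorem build_tower_spec : Claim_equal_build_tower := by
  intro T _ _
  unfold Spec_build_tower build_tower build_tower_alt
  rw [pvSortSum_eq]
  have hrests : T.map (fun t => PySem.List.sorted t (fun x => x) true)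
      = (T.map (fun t => PySem.List.sorted t (fun x => x))).map List.reverse := by
    rw [List.map_map]
    exact List.map_congr_left (fun t _ => pvSortedRev_eq t)
  rw [hrests]
  rcases pvFold_spec ((T.map (fun t => PySem.List.sorted t (fun x => x))).map List.reverse) 0 []
      (List.Pairwise.nil) (by simp) with ⟨hP, hW, _⟩
  have hsums : ((T.map (fun t => PySem.List.sorted t (fun x => x))).map List.reverse).map List.sum
      = T.map (fun t => (PySem.List.sorted t (fun x => x)).sum) := by
    rw [List.map_map, List.map_map]
    exact List.map_congr_left (fun t _ => by simp [Function.comp, List.sum_reverse])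
  rw [hsums, List.nil_append] at hP
  exact pvLoop_eq _ _ _ _ 0 0 (by simp) hP hW
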